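-- pv_equiv track=rewrite | github.com/bsinger-cmu/perry-caldera | app/actions/HighLevel/Scan.py | _group_ips
-- ===== SOURCE A (Python) =====
-- from collections import defaultdict
--
-- def _group_ips(ips):
--     # Create a dictionary where the keys are subnets and the values are lists of hosts
--     subnet_to_ips = defaultdict(list)
--
--     for ip in ips:
--         # Split the IP into subnet and host
--         subnet, host = ip.rsplit(".", 1)
--         # Append the host to the list of hosts for this subnet
--         subnet_to_ips[subnet].append(host)
--
--     # Create a list to hold the final IP addresses
--     grouped_ips = []
--
--     for subnet, hosts in subnet_to_ips.items():
--         # Join the hosts with commas and append the subnet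
--         grouped_ips.append(f"{subnet}.{','.join(hosts)}")
--
--     return grouped_ips
-- ===== SOURCE B (Python) =====
-- def _group_ips(ips):
--     # Phase 1: distinct subnets in first-appearance order
--     subnets = []
--     for ip in ips:
--         subnet, _host = ip.rsplit(".", 1)
--         if subnet not in subnets:
--             subnets.append(subnet)
--     # Phase 2: one rescan of ips per distinct subnet
--     return [
--         subnet + "." + ",".join(
--             ip.rsplit(".", 1)[1] for ip in ips if ip.rsplit(".", 1)[0] == subnet
--         )
--         for subnet in subnets
--     ]
-- ===== Notes on version B (the rewrite author's own statement) =====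
-- stated objective: alternative
-- what changed: Replaced the single-pass defaultdict index by a two-phase scheme: first collect the distinct subnets in first-appearance order, then rescan the whole list once per distinct subnet to gather its hosts.
import Mathlib
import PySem

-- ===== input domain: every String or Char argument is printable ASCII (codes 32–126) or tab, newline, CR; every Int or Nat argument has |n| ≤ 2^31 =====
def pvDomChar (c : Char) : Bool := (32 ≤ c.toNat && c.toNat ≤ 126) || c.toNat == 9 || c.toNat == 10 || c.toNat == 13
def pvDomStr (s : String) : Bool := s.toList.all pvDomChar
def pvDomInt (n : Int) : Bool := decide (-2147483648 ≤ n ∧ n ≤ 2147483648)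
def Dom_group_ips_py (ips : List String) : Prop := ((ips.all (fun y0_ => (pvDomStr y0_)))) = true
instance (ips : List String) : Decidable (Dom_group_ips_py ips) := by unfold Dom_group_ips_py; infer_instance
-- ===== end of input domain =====

-- B replaces A's single-pass defaultdict index by a two-phase scheme (distinct subnets
-- first, then one rescan of the list per subnet): an alternative traversal, not faster.

-- shared exact model of ip.rsplit(".", 1) unpacked into two parts:
-- none iff the string has no '.', i.e. exactly where the Python unpacking raises ValueError
def rsplit1 (s : String) : Option (String × String) :=
  let cs := s.toList
  if '.' ∈ cs then
    let rev := cs.reverse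
    some (String.ofList ((rev.dropWhile (· ≠ '.')).tail).reverse,
          String.ofList (rev.takeWhile (· ≠ '.')).reverse)
  else none

-- f"{subnet}.{','.join(hosts)}"
def renderGroup (sub : String) (hosts : List String) : String :=
  sub ++ "." ++ PySem.Str.join "," hosts

-- ===== PORT A =====
def group_ips_py (ips : List String) : List String :=
  let d := ips.foldl (fun d ip =>
    match rsplit1 ip with
    | some sh => d.modify sh.1 [] (· ++ [sh.2])
    | none => d) PySem.Dict.empty
  d.items.foldl (fun acc p => acc ++ [renderGroup p.1 p.2]) []

-- ===== PORT B =====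
def group_ips_py_alt (ips : List String) : List String :=
  let subnets := ips.foldl (fun acc ip =>
    match rsplit1 ip with
    | some sh => if sh.1 ∈ acc then acc else acc ++ [sh.1]
    | none => acc) []
  subnets.map (fun sub =>
    renderGroup sub (ips.filterMap (fun ip =>
      match rsplit1 ip with
      | some sh => if sh.1 = sub then some sh.2 else none
      | none => none)))

-- ===== PRECONDITION & SPEC =====
-- Pre_ excludes exactly the inputs containing a string without '.', on which the Python A
-- (and B alike) raises ValueError at the rsplit unpacking.
def Pre_group_ips_py (ips : List String) : Prop := ∀ ip ∈ ips, '.' ∈ ip.toList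
instance (ips : List String) : Decidable (Pre_group_ips_py ips) := by unfold Pre_group_ips_py; infer_instance
def pvWitness_group_ips_py : List String := ["10.0.0.1", "10.0.0.2", "192.168.1.7"]

def Spec_group_ips_py (ips : List String) (out : List String) : Prop := out = group_ips_py_alt ips
instance (ips : List String) (out : List String) : Decidable (Spec_group_ips_py ips out) := by unfold Spec_group_ips_py; infer_instance

-- ===== CLAIM (what is proved, stated in full; the proofs are below) =====
def Claim_equal_group_ips_py : Prop := ∀ (ips : List String), Dom_group_ips_py ips → Pre_group_ips_py ips → Spec_group_ips_py ips (group_ips_py ips)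

-- ===== LEMMAS AND PROOFS =====

-- A's loop over ips is the grouping fold over the successfully split pairs
theorem foldA_eq (ips : List String) (d : PySem.Dict String (List String)) :
    ips.foldl (fun d ip =>
      match rsplit1 ip with
      | some sh => d.modify sh.1 [] (· ++ [sh.2])
      | none => d) d
    = (ips.filterMap rsplit1).foldl (fun d p => d.modify p.1 [] (· ++ [p.2])) d := by
  induction ips generalizing d with
  | nil => rfl
  | cons ip t ih =>
    cases h : rsplit1 ip with
    | none => simp [h, ih]
    | some sh => simp [h, ih]

-- B's first loop is the dedup fold over the subnet parts of the pairs
theorem foldB_eq (ips : List String) (acc : List String) :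
    ips.foldl (fun acc ip =>
      match rsplit1 ip with
      | some sh => if sh.1 ∈ acc then acc else acc ++ [sh.1]
      | none => acc) acc
    = ((ips.filterMap rsplit1).map (·.1)).foldl (fun acc s => if s ∈ acc then acc else acc ++ [s]) acc := by
  induction ips generalizing acc with
  | nil => rfl
  | cons ip t ih =>
    cases h : rsplit1 ip with
    | none => simp [h, ih]
    | some sh => simp [h, ih]

theorem dedup_fold_eq_set_update (l : List String) (acc : List String) :
    l.foldl (fun acc s => if s ∈ acc then acc else acc ++ [s]) acc = PySem.Set.update acc l := by
  show _ = l.foldl PySem.Set.add acc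
  exact PySem.List.foldl_congr_mem l _ _ acc (fun a x _ => by
    simp only [PySem.Set.add, PySem.Set.contains, List.contains_eq_mem, decide_eq_true_eq])

-- B's comprehension over ips is the filter over the pairs
theorem hosts_eq (ips : List String) (sub : String) :
    ips.filterMap (fun ip =>
      match rsplit1 ip with
      | some sh => if sh.1 = sub then some sh.2 else none
      | none => none)
    = (((ips.filterMap rsplit1)).filter (fun p => p.1 == sub)).map (·.2) := by
  induction ips with
  | nil => rfl
  | cons ip t ih =>
    cases h : rsplit1 ip with
    | none => simp [h, ih]
    | some sh =>
      by_cases hs : sh.1 = sub <;>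
        simp [h, hs, ih]

theorem group_ips_eq (ips : List String) : group_ips_py ips = group_ips_py_alt ips := by
  unfold group_ips_py group_ips_py_alt
  rw [foldA_eq, foldB_eq, dedup_fold_eq_set_update, PySem.List.foldl_append_singleton_eq_map]
  set ps := ips.filterMap rsplit1 with hps
  have hnodup : ((ps.foldl (fun d p => d.modify p.1 [] (· ++ [p.2])) PySem.Dict.empty)).keys.Nodup :=
    PySem.Dict.nodup_keys_foldl_modify_key ps Prod.fst [] (fun _ p => (· ++ [p.2])) _
      (by simp [PySem.Dict.keys, PySem.Dict.empty])
  rw [PySem.Dict.items_eq_map_keys _ hnodup []]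
  rw [PySem.Dict.keys_foldl_modify_key]
  have hkeys : PySem.Set.update (PySem.Dict.empty (κ := String) (ν := List String)).keys (ps.map (·.1))
      = PySem.Set.update [] (ps.map (·.1)) := by
    simp [PySem.Dict.keys, PySem.Dict.empty]
  rw [hkeys, List.map_map]
  simp only [List.nil_append]
  refine List.map_congr_left (fun sub _ => ?_)
  simp only [Function.comp]
  rw [PySem.Dict.getD_foldl_modify_append, hosts_eq, ← hps]
  simp [PySem.Dict.getD_empty]

-- ===== VERDICT (by name: the statement is the Claim_ definition above) =====
theorem group_ips_py_spec : Claim_equal_group_ips_py := by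
  intro ips _ _
  exact group_ips_eq ips
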